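-- pv_equiv track=rewrite | github.com/petereast/one-hour-texteditor | SyntaxHighlighter.py | robust_split
-- ===== SOURCE A (Python) =====
-- def robust_split(string, sep):
--     # sep as a list of seperation strings
--     output_list = []
--
--     last_break_index = 0
--
--     for index, char in enumerate(string):
--         for s in sep:
--             if char == s[0]:
--                 if string[index:index+len(s)] == s:
--                     #Break the string here
--                     output_list.append(string[last_break_index:index])
--                     last_break_index = index
--     output_list.append(string[last_break_index:])
--     return output_list
-- ===== SOURCE B (Python) =====
-- def robust_split(string, sep):
--     # Two-pass: collect break positions, then slice over consecutive boundaries.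
--     breaks = [i for i in range(len(string)) for s in sep if string[i:i+len(s)] == s]
--     bounds = [0] + breaks + [len(string)]
--     return [string[a:b] for a, b in zip(bounds, bounds[1:])]
-- ===== Notes on version B (the rewrite author's own statement) =====
-- stated objective: alternative
-- what changed: A splits in one stateful pass that appends a segment and moves last_break_index at every separator match; B first collects the list of break positions (duplicates kept), then forms the boundary list [0]+breaks+[len] and produces the output by slicing over consecutive boundary pairs.
import Mathlib
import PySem

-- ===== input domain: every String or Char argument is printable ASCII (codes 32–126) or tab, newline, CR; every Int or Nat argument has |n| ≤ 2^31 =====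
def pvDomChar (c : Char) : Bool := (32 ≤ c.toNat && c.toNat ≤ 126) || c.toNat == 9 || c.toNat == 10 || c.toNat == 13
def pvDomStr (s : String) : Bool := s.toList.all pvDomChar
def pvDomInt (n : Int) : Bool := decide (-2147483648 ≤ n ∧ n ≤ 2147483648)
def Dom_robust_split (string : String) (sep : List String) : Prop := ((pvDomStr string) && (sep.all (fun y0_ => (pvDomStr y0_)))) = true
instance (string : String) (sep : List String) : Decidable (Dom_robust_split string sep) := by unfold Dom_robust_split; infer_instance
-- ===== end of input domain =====

-- B replaces A's stateful single pass by collect-break-positions then slice over consecutive boundaries (alternative decomposition, same cost).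

-- ===== PORT A =====
def robust_split (string : String) (sep : List String) : List String :=
  let st := (PySem.List.enumerate string.toList 0).foldl
    (fun (acc : List String × Int) (p : Int × Char) =>
      sep.foldl (fun (acc2 : List String × Int) (s : String) =>
        if some p.2 == PySem.Str.pyGet? s 0 then
          if PySem.Str.slice string (some p.1) (some (p.1 + PySem.Str.len s)) == s then
            (acc2.1 ++ [PySem.Str.slice string (some acc2.2) (some p.1)], p.1)
          else acc2
        else acc2) acc)
    ([], 0)
  st.1 ++ [PySem.Str.slice string (some st.2) none]

-- ===== PORT B =====
def robust_split_alt (string : String) (sep : List String) : List String :=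
  let breaks := (PySem.List.pyRange 0 (PySem.Str.len string) 1).flatMap
    (fun i => sep.filterMap (fun s =>
      if PySem.Str.slice string (some i) (some (i + PySem.Str.len s)) == s then some i else none))
  let bounds := 0 :: breaks ++ [PySem.Str.len string]
  (bounds.zip bounds.tail).map (fun p => PySem.Str.slice string (some p.1) (some p.2))

-- ===== PRECONDITION & SPEC =====
-- Pre_ excludes only the inputs where A raises IndexError: a non-empty string with "" among the separators.
def Pre_robust_split (string : String) (sep : List String) : Prop := string = "" ∨ "" ∉ sep
instance (string : String) (sep : List String) : Decidable (Pre_robust_split string sep) := by unfold Pre_robust_split; infer_instance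
def pvWitness_robust_split : String × List String := ("a, b,c", [", ", ","])

def Spec_robust_split (string : String) (sep : List String) (out : List String) : Prop := out = robust_split_alt string sep
instance (string : String) (sep : List String) (out : List String) : Decidable (Spec_robust_split string sep out) := by unfold Spec_robust_split; infer_instance

-- ===== CLAIM (what is proved, stated in full; the proofs are below) =====
def Claim_equal_robust_split : Prop := ∀ (string : String) (sep : List String), Dom_robust_split string sep → Pre_robust_split string sep → Spec_robust_split string sep (robust_split string sep)

-- ===== LEMMAS AND PROOFS =====

-- the segments determined by a list of break positions (B's view of the output)
def pvSegs (string : String) : Int → List Int → List String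
  | a, [] => [PySem.Str.slice string (some a) (some (PySem.Str.len string))]
  | a, b :: bs => PySem.Str.slice string (some a) (some b) :: pvSegs string b bs

-- the break positions contributed by one index
def pvReps (string : String) (sep : List String) (i : Int) : List Int :=
  sep.filterMap (fun s =>
    if PySem.Str.slice string (some i) (some (i + PySem.Str.len s)) == s then some i else none)

-- all break positions from index k on
def pvBreaks (string : String) (sep : List String) (k : Int) : List Int :=
  (PySem.List.pyRange k (PySem.Str.len string) 1).flatMap (pvReps string sep)

-- A's inner loop body at a fixed (index, char)
def pvF (string : String) (k : Int) (c : Char) (acc2 : List String × Int) (s : String) : List String × Int :=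
  if some c == PySem.Str.pyGet? s 0 then
    if PySem.Str.slice string (some k) (some (k + PySem.Str.len s)) == s then
      (acc2.1 ++ [PySem.Str.slice string (some acc2.2) (some k)], k)
    else acc2
  else acc2

lemma pvA_unfold (string : String) (sep : List String) :
    robust_split string sep =
      (let st := (PySem.List.enumerate string.toList 0).foldl
          (fun (acc : List String × Int) (p : Int × Char) => sep.foldl (pvF string p.1 p.2) acc) ([], 0)
       st.1 ++ [PySem.Str.slice string (some st.2) none]) := rfl

lemma pvCharsSlice (cs : List Char) (a b : Option Int) :
    PySem.Chars.slice cs a b = PySem.List.slice cs a b := rfl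

lemma pvToListInj (a b : String) (h : a.toList = b.toList) : a = b := by
  have := congrArg String.ofList h
  simpa using this

lemma pvSliceNone (string : String) (a : Int) (ha : 0 ≤ a) :
    PySem.Str.slice string (some a) none = PySem.Str.slice string (some a) (some (PySem.Str.len string)) := by
  apply pvToListInj
  simp only [PySem.Str.slice, String.toList_ofList, pvCharsSlice]
  rw [PySem.List.slice_from _ ha, PySem.List.slice_toNat _ ha (by simp [PySem.Str.len])]
  exact (List.take_of_length_le (by simp [PySem.Str.len])).symm

lemma pvFirstChar (string s : String) (k : Int) (c : Char) (hk : 0 ≤ k)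
    (hc : string.toList[k.toNat]? = some c) (hs : s ≠ "")
    (hcond : PySem.Str.slice string (some k) (some (k + PySem.Str.len s)) = s) :
    PySem.Str.pyGet? s 0 = some c := by
  cases hlist : s.toList with
  | nil =>
    exact absurd (pvToListInj s "" (by simpa using hlist)) hs
  | cons d t =>
    have h2 : PySem.List.slice string.toList (some k) (some (k + PySem.Str.len s)) = s.toList := by
      have := congrArg String.toList hcond
      simpa [PySem.Str.slice, pvCharsSlice] using this
    rw [PySem.List.slice_toNat _ hk (by simp [PySem.Str.len]; omega)] at h2
    rw [hlist] at h2
    have hhead : string.toList[k.toNat]? = some d := by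
      cases hd : string.toList.drop k.toNat with
      | nil => rw [hd] at h2; simp at h2
      | cons a l =>
        rw [hd] at h2
        cases hm : ((k + PySem.Str.len s).toNat - k.toNat) with
        | zero => rw [hm] at h2; simp at h2
        | succ m =>
          rw [hm] at h2
          simp only [List.take_succ_cons, List.cons.injEq] at h2
          have hdrop : (string.toList.drop k.toNat)[0]? = string.toList[k.toNat + 0]? :=
            List.getElem?_drop
          rw [hd] at hdrop
          simp only [List.getElem?_cons_zero, Nat.add_zero] at hdrop
          rw [← hdrop, h2.1]
    rw [hc] at hhead
    have hcd : c = d := by injection hhead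
    subst hcd
    simp [PySem.Str.pyGet?, PySem.List.pyGet?, PySem.Chars.pyGet?, PySem.List.pyIdx?, hlist]

lemma pvInner (string : String) (k : Int) (c : Char) (hk : 0 ≤ k)
    (hc : string.toList[k.toNat]? = some c) :
    ∀ (sep' : List String), (∀ s ∈ sep', s ≠ "") →
    ∀ (out : List String) (last : Int) (Xs : List Int),
      ((sep'.foldl (pvF string k c) (out, last)).1
          ++ pvSegs string (sep'.foldl (pvF string k c) (out, last)).2 Xs
        = out ++ pvSegs string last (pvReps string sep' k ++ Xs))
      ∧ ((sep'.foldl (pvF string k c) (out, last)).2 = last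
         ∨ (sep'.foldl (pvF string k c) (out, last)).2 = k) := by
  intro sep'
  induction sep' with
  | nil => intro _ out last Xs; simp [pvReps]
  | cons s rest ih =>
    intro hall out last Xs
    have hs : s ≠ "" := hall s (List.mem_cons_self)
    have hrest : ∀ x ∈ rest, x ≠ "" := fun x hx => hall x (List.mem_cons_of_mem _ hx)
    by_cases hcond : PySem.Str.slice string (some k) (some (k + PySem.Str.len s)) = s
    · have hbeq : (PySem.Str.slice string (some k) (some (k + PySem.Str.len s)) == s) = true :=
        beq_iff_eq.mpr hcond
      have hget : (some c == PySem.Str.pyGet? s 0) = true := by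
        rw [pvFirstChar string s k c hk hc hs hcond]; simp
      have hstep : pvF string k c (out, last) s
          = (out ++ [PySem.Str.slice string (some last) (some k)], k) := by
        simp only [pvF, hget, hbeq]; simp
      have hreps : pvReps string (s :: rest) k = k :: pvReps string rest k := by
        unfold pvReps
        rw [List.filterMap_cons]
        simp only [hbeq]
        simp
      simp only [List.foldl_cons, hstep]
      obtain ⟨ih1, ih2⟩ := ih hrest (out ++ [PySem.Str.slice string (some last) (some k)]) k Xs
      refine ⟨?_, ?_⟩
      · rw [ih1, hreps]
        simp [pvSegs]
      · rcases ih2 with h | h <;> simp [h]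
    · have hbeq : (PySem.Str.slice string (some k) (some (k + PySem.Str.len s)) == s) = false :=
        beq_eq_false_iff_ne.mpr hcond
      have hstep : pvF string k c (out, last) s = (out, last) := by
        simp only [pvF, hbeq]; simp
      have hreps : pvReps string (s :: rest) k = pvReps string rest k := by
        unfold pvReps
        rw [List.filterMap_cons]
        simp only [hbeq]
        simp
      simp only [List.foldl_cons, hstep, hreps]
      exact ih hrest out last Xs

lemma pvBreaks_cons (string : String) (sep : List String) (k : Int)
    (h : k < PySem.Str.len string) :
    pvBreaks string sep k = pvReps string sep k ++ pvBreaks string sep (k + 1) := by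
  unfold pvBreaks
  rw [PySem.List.pyRange_one_cons h]
  simp

lemma pvMain (string : String) (sep : List String) (hsep : ∀ s ∈ sep, s ≠ "") :
    ∀ (cs' : List Char) (k : Int), 0 ≤ k → cs' = string.toList.drop k.toNat →
    ∀ (out : List String) (last : Int), 0 ≤ last →
      ((PySem.List.enumerate cs' k).foldl
          (fun (acc : List String × Int) (p : Int × Char) => sep.foldl (pvF string p.1 p.2) acc) (out, last)).1
        ++ [PySem.Str.slice string
            (some (((PySem.List.enumerate cs' k).foldl
              (fun (acc : List String × Int) (p : Int × Char) => sep.foldl (pvF string p.1 p.2) acc) (out, last)).2)) none]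
      = out ++ pvSegs string last (pvBreaks string sep k) := by
  intro cs'
  induction cs' with
  | nil =>
    intro k hk hcs out last hlast
    have hn : string.toList.length ≤ k.toNat := List.drop_eq_nil_iff.mp hcs.symm
    have hrange : PySem.List.pyRange k (PySem.Str.len string) 1 = [] :=
      PySem.List.pyRange_one_eq_nil (by simp only [PySem.Str.len]; omega)
    rw [PySem.List.enumerate_nil]
    simp only [List.foldl_nil]
    unfold pvBreaks
    rw [hrange]
    simp only [List.flatMap_nil]
    rw [pvSliceNone string last hlast]
    rfl
  | cons c cs' ih =>
    intro k hk hcs out last hlast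
    have hkn : k.toNat < string.toList.length := by
      by_contra hle
      have hnil : string.toList.drop k.toNat = [] := List.drop_eq_nil_iff.mpr (by omega)
      rw [← hcs] at hnil
      simp at hnil
    have hc : string.toList[k.toNat]? = some c := by
      have hdrop : (string.toList.drop k.toNat)[0]? = string.toList[k.toNat + 0]? :=
        List.getElem?_drop
      rw [← hcs] at hdrop
      simpa using hdrop.symm
    have hcs' : cs' = string.toList.drop (k + 1).toNat := by
      have ht : (string.toList.drop k.toNat).tail = string.toList.drop (k.toNat + 1) := by
        simp [List.tail_drop]
      have h0 : cs' = (string.toList.drop k.toNat).tail := by rw [← hcs, List.tail_cons]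
      rw [h0, ht]
      congr 1
      omega
    rw [PySem.List.enumerate_cons]
    simp only [List.foldl_cons]
    obtain ⟨h1, h2⟩ := pvInner string k c hk hc sep hsep out last (pvBreaks string sep (k + 1))
    set st := sep.foldl (pvF string k c) (out, last) with hst
    have hlast' : 0 ≤ st.2 := by rcases h2 with h | h <;> omega
    have hrec := ih (k + 1) (by omega) hcs' st.1 st.2 hlast'
    simp only [Prod.mk.eta] at hrec
    rw [hrec, h1, pvBreaks_cons string sep k (by simp only [PySem.Str.len]; omega)]

lemma pvZip (string : String) :
    ∀ (bs : List Int) (a : Int),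
      (((a :: (bs ++ [PySem.Str.len string])).zip (bs ++ [PySem.Str.len string])).map
        (fun p => PySem.Str.slice string (some p.1) (some p.2))) = pvSegs string a bs := by
  intro bs
  induction bs with
  | nil => intro a; simp [pvSegs]
  | cons b bs ih => intro a; simp only [List.cons_append, List.zip_cons_cons, List.map_cons, pvSegs, ih]

lemma pvAlt_eq (string : String) (sep : List String) :
    robust_split_alt string sep = pvSegs string 0 (pvBreaks string sep 0) := by
  show (((0 : Int) :: (pvBreaks string sep 0 ++ [PySem.Str.len string])).zip
      ((pvBreaks string sep 0 ++ [PySem.Str.len string]))).map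
      (fun p => PySem.Str.slice string (some p.1) (some p.2)) = _
  exact pvZip string (pvBreaks string sep 0) 0

-- ===== VERDICT (by name: the statement is the Claim_ definition above) =====
theorem robust_split_spec : Claim_equal_robust_split := by
  intro string sep _hdom hpre
  unfold Spec_robust_split
  rcases eq_or_ne string "" with hs | hs
  · subst hs
    have ha : robust_split "" sep = [PySem.Str.slice "" (some 0) none] := rfl
    have hb : robust_split_alt "" sep = [PySem.Str.slice "" (some 0) (some 0)] := rfl
    rw [ha, hb]
    decide
  · have hsep : ∀ s ∈ sep, s ≠ "" := by
      intro s hmem hcon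
      subst hcon
      rcases hpre with h | h
      · exact hs h
      · exact h hmem
    rw [pvA_unfold, pvAlt_eq]
    have := pvMain string sep hsep string.toList 0 (by omega) (by simp) [] 0 (by omega)
    simpa using this
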